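-- pv_equiv track=rewrite | github.com/Arifulhaque313/problem-solving | HackerRank/php/sort_the_array.py | min_operations_to_sort
-- ===== SOURCE A (Python) =====
-- def min_operations_to_sort(arr):
--
--     unique_elements = set(arr)
--     positions = {element: [] for element in unique_elements}
--     for index, value in enumerate(arr):
--         positions[value].append(index)
--     sorted_arr = sorted(arr)
--     sorted_positions = {element: [] for element in unique_elements}
--     for index, value in enumerate(sorted_arr):
--         sorted_positions[value].append(index)
--     operations = 0
--     for element in unique_elements:
--         if positions[element] != sorted_positions[element]:
--             operations += 1
--     return operations
-- ===== SOURCE B (Python) =====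
-- def min_operations_to_sort(arr):
--     bad = set()
--     for orig, srt in zip(arr, sorted(arr)):
--         if orig != srt:
--             bad.add(orig)
--             bad.add(srt)
--     return len(bad)
-- ===== Notes on version B (the rewrite author's own statement) =====
-- stated objective: simpler
-- what changed: Replaced the two per-value index-position dictionaries and the per-value list comparison by a single co-traversal of arr with sorted(arr) that collects into one set every value occurring on either side of a mismatched position; the answer is that set's size.
import Mathlib
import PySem

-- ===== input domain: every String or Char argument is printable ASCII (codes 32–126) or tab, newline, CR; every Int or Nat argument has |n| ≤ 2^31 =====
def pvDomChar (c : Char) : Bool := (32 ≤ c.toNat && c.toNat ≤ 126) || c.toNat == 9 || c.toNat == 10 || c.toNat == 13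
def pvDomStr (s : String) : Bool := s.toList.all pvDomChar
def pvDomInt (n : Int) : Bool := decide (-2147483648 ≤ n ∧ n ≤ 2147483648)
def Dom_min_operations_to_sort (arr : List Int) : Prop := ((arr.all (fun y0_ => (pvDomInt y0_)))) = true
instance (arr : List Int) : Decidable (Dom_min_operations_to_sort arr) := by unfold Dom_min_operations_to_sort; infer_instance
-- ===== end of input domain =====

-- B replaces A's two index-position dictionaries and per-value list comparison by one
-- co-traversal of arr with sorted(arr) collecting mismatched values in a single set (simpler).

-- ===== PORT A =====
def min_operations_to_sort (arr : List Int) : Int :=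
  let unique_elements : PySem.Set Int := PySem.Set.ofList arr
  let positions0 : PySem.Dict Int (List Int) :=
    unique_elements.foldl (fun d element => d.insert element []) PySem.Dict.empty
  let positions :=
    (PySem.List.enumerate arr).foldl
      (fun d p => d.modify p.2 [] (fun l => l ++ [p.1])) positions0
  let sorted_arr := PySem.List.sorted arr (fun x => x) false
  let sorted_positions0 : PySem.Dict Int (List Int) :=
    unique_elements.foldl (fun d element => d.insert element []) PySem.Dict.empty
  let sorted_positions :=
    (PySem.List.enumerate sorted_arr).foldl
      (fun d p => d.modify p.2 [] (fun l => l ++ [p.1])) sorted_positions0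
  let operations : Int := 0
  unique_elements.foldl
    (fun operations element =>
      if positions.getD element [] ≠ sorted_positions.getD element [] then operations + 1
      else operations) operations

-- ===== PORT B =====
def min_operations_to_sort_alt (arr : List Int) : Int :=
  let sorted_arr := PySem.List.sorted arr (fun x => x) false
  let bad : PySem.Set Int :=
    (arr.zip sorted_arr).foldl
      (fun bad p => if p.1 ≠ p.2 then (bad.add p.1).add p.2 else bad) PySem.Set.empty
  PySem.Set.len bad

-- ===== PRECONDITION & SPEC =====
def Spec_min_operations_to_sort (arr : List Int) (out : Int) : Prop := out = min_operations_to_sort_alt arr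
instance (arr : List Int) (out : Int) : Decidable (Spec_min_operations_to_sort arr out) := by unfold Spec_min_operations_to_sort; infer_instance

-- ===== CLAIM (what is proved, stated in full; the proofs are below) =====
def Claim_equal_min_operations_to_sort : Prop := ∀ (arr : List Int), Dom_min_operations_to_sort arr → Spec_min_operations_to_sort arr (min_operations_to_sort arr)

-- ===== LEMMAS AND PROOFS =====

-- the index list of value v in xs, indices starting at s (what A's position dicts hold)
def pvIdx (xs : List Int) (s v : Int) : List Int :=
  ((PySem.List.enumerate xs s).filter (fun p => p.2 == v)).map (fun p => p.1)

-- the dict comprehension {e: [] for e in u} answers [] at every key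
lemma pvInit_getD (l : List Int) (d : PySem.Dict Int (List Int))
    (h : ∀ w, d.getD w [] = []) (v : Int) :
    (l.foldl (fun d e => d.insert e ([] : List Int)) d).getD v [] = [] := by
  induction l generalizing d with
  | nil => exact h v
  | cons x xs ih =>
      refine ih _ (fun w => ?_)
      rw [PySem.Dict.getD_insert]
      split <;> simp [h]

-- A's position dict looks up to pvIdx
lemma pvPos_getD (xs : List Int) (d : PySem.Dict Int (List Int))
    (h : ∀ w, d.getD w [] = []) (v : Int) :
    ((PySem.List.enumerate xs).foldl
      (fun d p => d.modify p.2 [] (fun l => l ++ [p.1])) d).getD v [] = pvIdx xs 0 v := by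
  have hf := PySem.Dict.getD_foldl_modify_append ((PySem.List.enumerate xs).map Prod.swap) d v
  rw [List.foldl_map] at hf
  simp only [Prod.fst_swap, Prod.snd_swap] at hf
  rw [hf, h, List.nil_append, pvIdx, List.filter_map, List.map_map]
  congr 1

lemma pvIdx_cons (x : Int) (xs : List Int) (s v : Int) :
    pvIdx (x :: xs) s v = (if x = v then [s] else []) ++ pvIdx xs (s + 1) v := by
  by_cases h : x = v <;>
    simp [pvIdx, PySem.List.enumerate_cons, h]

lemma pvIdx_ge (xs : List Int) (s v j : Int) (hj : j ∈ pvIdx xs s v) : s ≤ j := by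
  simp only [pvIdx, List.mem_map, List.mem_filter] at hj
  obtain ⟨p, ⟨hp, -⟩, rfl⟩ := hj
  rw [PySem.List.mem_enumerate_iff] at hp
  obtain ⟨k, hk, rfl⟩ := hp
  omega

-- the key equivalence: the index lists agree iff the two arrays carry v at the same positions
lemma pvIdx_eq_iff (xs : List Int) : ∀ (ys : List Int) (s v : Int), xs.length = ys.length →
    (pvIdx xs s v = pvIdx ys s v ↔
      ∀ (i : Nat) (h1 : i < xs.length) (h2 : i < ys.length), (xs[i] = v ↔ ys[i] = v)) := by
  induction xs with
  | nil =>
      intro ys s v hlen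
      cases ys with
      | nil => simp
      | cons y ys => simp at hlen
  | cons x xs ih =>
      intro ys s v hlen
      cases ys with
      | nil => simp at hlen
      | cons y ys =>
        simp only [List.length_cons, Nat.add_right_cancel_iff] at hlen
        rw [pvIdx_cons, pvIdx_cons]
        by_cases hx : x = v <;> by_cases hy : y = v
        · rw [if_pos hx, if_pos hy]
          simp only [List.singleton_append, List.cons.injEq, true_and]
          rw [ih ys (s + 1) v hlen]
          constructor
          · intro h i h1 h2
            cases i with
            | zero => simp [hx, hy]
            | succ n => simpa using h n (by simpa using h1) (by simpa using h2)
          · intro h i h1 h2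
            simpa using h (i + 1) (by simpa using h1) (by simpa using h2)
        · refine iff_of_false ?_ ?_
          · intro he
            rw [if_pos hx, if_neg hy, List.singleton_append, List.nil_append] at he
            have hmem : s ∈ pvIdx ys (s + 1) v := by
              rw [← he]; exact List.mem_cons_self
            have := pvIdx_ge ys (s + 1) v s hmem
            omega
          · intro h
            have := h 0 (by simp) (by simp)
            simp [hx, hy] at this
        · refine iff_of_false ?_ ?_
          · intro he
            rw [if_neg hx, if_pos hy, List.singleton_append, List.nil_append] at he
            have hmem : s ∈ pvIdx xs (s + 1) v := by
              rw [he]; exact List.mem_cons_self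
            have := pvIdx_ge xs (s + 1) v s hmem
            omega
          · intro h
            have := h 0 (by simp) (by simp)
            simp [hx, hy] at this
        · rw [if_neg hx, if_neg hy, List.nil_append, List.nil_append]
          rw [ih ys (s + 1) v hlen]
          constructor
          · intro h i h1 h2
            cases i with
            | zero => simp [hx, hy]
            | succ n => simpa using h n (by simpa using h1) (by simpa using h2)
          · intro h i h1 h2
            simpa using h (i + 1) (by simpa using h1) (by simpa using h2)

-- membership in B's set
lemma pvBad_mem (l : List (Int × Int)) : ∀ (s : PySem.Set Int) (v : Int),
    (v ∈ l.foldl (fun bad p => if p.1 ≠ p.2 then (bad.add p.1).add p.2 else bad) s ↔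
      v ∈ s ∨ ∃ p ∈ l, p.1 ≠ p.2 ∧ (v = p.1 ∨ v = p.2)) := by
  induction l with
  | nil => simp
  | cons q l ih =>
      intro s v
      simp only [List.foldl_cons, List.mem_cons]
      by_cases h : q.1 = q.2
      · rw [if_neg (by simp [h]), ih]
        constructor
        · rintro (hs | ⟨p, hp, hne, hv⟩)
          · exact Or.inl hs
          · exact Or.inr ⟨p, Or.inr hp, hne, hv⟩
        · rintro (hs | ⟨p, (rfl | hp), hne, hv⟩)
          · exact Or.inl hs
          · exact absurd h hne
          · exact Or.inr ⟨p, hp, hne, hv⟩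
      · rw [if_pos (by simp [h]), ih]
        simp only [PySem.Set.mem_add]
        constructor
        · rintro ((((hs | h1) | h2) | ⟨p, hp, hne, hv⟩))
          · exact Or.inl hs
          · exact Or.inr ⟨q, Or.inl rfl, h, Or.inl h1⟩
          · exact Or.inr ⟨q, Or.inl rfl, h, Or.inr h2⟩
          · exact Or.inr ⟨p, Or.inr hp, hne, hv⟩
        · rintro (hs | ⟨p, (rfl | hp), hne, hv⟩)
          · exact Or.inl (Or.inl (Or.inl hs))
          · rcases hv with h1 | h2
            · exact Or.inl (Or.inl (Or.inr h1))
            · exact Or.inl (Or.inr h2)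
          · exact Or.inr ⟨p, hp, hne, hv⟩

lemma pvBad_nodup (l : List (Int × Int)) : ∀ (s : PySem.Set Int), s.Nodup →
    (l.foldl (fun bad p => if p.1 ≠ p.2 then (bad.add p.1).add p.2 else bad) s).Nodup := by
  induction l with
  | nil => intro s hs; exact hs
  | cons q l ih =>
      intro s hs
      simp only [List.foldl_cons]
      split
      · exact ih _ (PySem.Set.nodup_add _ _ (PySem.Set.nodup_add _ _ hs))
      · exact ih _ hs

-- A's loop counts the distinct values whose index lists differ
lemma pvA_eq (arr : List Int) :
    min_operations_to_sort arr =
      ((PySem.Set.ofList arr).countP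
        (fun e => decide (pvIdx arr 0 e ≠
          pvIdx (PySem.List.sorted arr (fun x => x) false) 0 e)) : Int) := by
  unfold min_operations_to_sort
  have hA : ∀ e : Int, ((PySem.List.enumerate arr).foldl
      (fun d p => d.modify p.2 [] (fun l => l ++ [p.1]))
      ((PySem.Set.ofList arr).foldl (fun d element => d.insert element []) PySem.Dict.empty)).getD e []
      = pvIdx arr 0 e := fun e =>
    pvPos_getD arr _ (fun w => pvInit_getD _ _ (fun w' => PySem.Dict.getD_empty w' []) w) e
  have hS : ∀ e : Int, ((PySem.List.enumerate (PySem.List.sorted arr (fun x => x) false)).foldl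
      (fun d p => d.modify p.2 [] (fun l => l ++ [p.1]))
      ((PySem.Set.ofList arr).foldl (fun d element => d.insert element []) PySem.Dict.empty)).getD e []
      = pvIdx (PySem.List.sorted arr (fun x => x) false) 0 e := fun e =>
    pvPos_getD _ _ (fun w => pvInit_getD _ _ (fun w' => PySem.Dict.getD_empty w' []) w) e
  simp only [hA, hS]
  rw [show (fun (operations : Int) element =>
      if pvIdx arr 0 element ≠ pvIdx (PySem.List.sorted arr (fun x => x) false) 0 element
      then operations + 1 else operations) =
      (fun (acc : Int) x =>
        if (fun e => decide (pvIdx arr 0 e ≠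
            pvIdx (PySem.List.sorted arr (fun x => x) false) 0 e)) x = true
        then acc + 1 else acc) from by funext acc x; simp]
  rw [PySem.List.foldl_count_if]
  simp

-- the mismatch characterisation both counts agree on
lemma pv_mismatch (arr : List Int) (a : Int) :
    (a ∈ arr ∧ pvIdx arr 0 a ≠ pvIdx (PySem.List.sorted arr (fun x => x) false) 0 a) ↔
    ∃ q ∈ arr.zip (PySem.List.sorted arr (fun x => x) false),
      q.1 ≠ q.2 ∧ (a = q.1 ∨ a = q.2) := by
  set srt := PySem.List.sorted arr (fun x => x) false with hsrt
  have hlen : arr.length = srt.length := (PySem.List.length_sorted arr _ false).symm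
  constructor
  · rintro ⟨hmem, hne⟩
    have hnot : ¬ ∀ (i : Nat) (h1 : i < arr.length) (h2 : i < srt.length),
        (arr[i] = a ↔ srt[i] = a) :=
      fun h => hne ((pvIdx_eq_iff arr srt 0 a hlen).mpr h)
    push Not at hnot
    obtain ⟨i, h1, h2, hiff⟩ := hnot
    refine ⟨(arr[i], srt[i]), ?_, ?_, ?_⟩
    · exact List.mem_iff_getElem.mpr ⟨i, by rw [List.length_zip]; omega,
        List.getElem_zip⟩
    · intro h
      replace h : arr[i] = srt[i] := h
      rcases hiff with ⟨hp1, hp2⟩ | ⟨hq1, hq2⟩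
      · exact hp2 (h ▸ hp1)
      · exact hq1 (h.trans hq2)
    · rcases hiff with ⟨hp1, hp2⟩ | ⟨hq1, hq2⟩
      · exact Or.inl hp1.symm
      · exact Or.inr hq2.symm
  · rintro ⟨q, hq, hne, hv⟩
    obtain ⟨i, hi, hq'⟩ := List.mem_iff_getElem.mp hq
    rw [List.length_zip] at hi
    have h1 : i < arr.length := by omega
    have h2 : i < srt.length := by omega
    have hq2 : q = (arr[i], srt[i]) := by rw [← hq']; exact List.getElem_zip
    subst hq2
    simp only [] at hne hv
    constructor
    · rcases hv with rfl | rfl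
      · exact List.getElem_mem h1
      · exact (PySem.List.mem_sorted arr _ false _).mp (List.getElem_mem h2)
    · intro heq
      have hall := (pvIdx_eq_iff arr srt 0 a hlen).mp heq i h1 h2
      rcases hv with rfl | rfl
      · exact hne (hall.mp rfl).symm
      · exact hne (hall.mpr rfl)

-- ===== VERDICT (by name: the statement is the Claim_ definition above) =====
theorem min_operations_to_sort_spec : Claim_equal_min_operations_to_sort := by
  intro arr _
  unfold Spec_min_operations_to_sort
  rw [pvA_eq]
  show _ = min_operations_to_sort_alt arr
  unfold min_operations_to_sort_alt
  have hcast : ∀ s : PySem.Set Int, PySem.Set.len s = (s.length : Int) := fun s => rfl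
  rw [hcast, List.countP_eq_length_filter]
  congr 1
  apply List.Perm.length_eq
  rw [List.perm_ext_iff_of_nodup
    (List.Nodup.filter _ (PySem.Set.nodup_ofList arr))
    (pvBad_nodup _ PySem.Set.empty (show (PySem.Set.empty : PySem.Set Int).Nodup from List.nodup_nil))]
  intro a
  rw [List.mem_filter, pvBad_mem]
  simp only [PySem.Set.mem_ofList, decide_eq_true_eq, PySem.Set.empty, List.not_mem_nil, false_or]
  exact pv_mismatch arr a
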